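-- pv_equiv track=rewrite | github.com/candelaesquivel/Programming1_exercises_Python | ejercicios tipo parcial/Candela Esquivel EJERCICIO 2.py | chequeoNombreCompleto
-- ===== SOURCE A (Python) =====
-- def chequeoNombreCompleto(nombre,i=0,chequeoNom=True):
--     '''Recibimos un nombre completo, el cual puede tener hasta dos apellidos y hasta 3 nombres inclusive
--        chequeamos que sea un dato valido
--        retornamos si es correcto(True) o incorrecto(False)
--     '''
--     if i==0:
--         #pasamos a str para evitar errores por el tipo de dato que nos llegue a la funcion
--         nombre=str(nombre).split()
--         #usamos conjuntos para verificar que las palabras del nombre completo no esten repetidas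
--         nombre=list(set(nombre))
--     if len(nombre)== i or chequeoNom==False:
--         return chequeoNom
--     else:
--         nombre[i]=nombre[i].strip()
--         #un nombre o apellido considero que tiene que tener un minimo de 3 letras
--         if not(nombre[i].isalpha() and len(nombre[i])>=3) or len(nombre)<2 or len(nombre)>5 :
--             chequeoNom=False
--
--         return chequeoNombreCompleto(nombre,i+1,chequeoNom)
-- ===== SOURCE B (Python) =====
-- def chequeoNombreCompleto(nombre, i=0, chequeoNom=True):
--     """Valid iff the deduplicated words of the name are 2..5 words,
--     each alphabetic with at least 3 letters (empty input counts as valid)."""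
--     if chequeoNom == False:
--         return False
--     words = list(set(str(nombre).split()))
--     if not words:
--         return True
--     ok = 2 <= len(words) <= 5
--     for w in words:
--         w = w.strip()
--         if not (w.isalpha() and len(w) >= 3):
--             ok = False
--     return ok
-- ===== Notes on version B (the rewrite author's own statement) =====
-- stated objective: simpler
-- what changed: Replaces A's index-carrying recursion (which rebuilds and mutates the word list while threading an accumulator flag through recursive calls) with a single flat pass: dedup the split words once, early-return on empty/False, then one for-loop over the words with a boolean accumulator.
-- outside the precondition, e.g. on chequeoNombreCompleto('xyz', 3, True): A returns True, B returns False
import Mathlib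
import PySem

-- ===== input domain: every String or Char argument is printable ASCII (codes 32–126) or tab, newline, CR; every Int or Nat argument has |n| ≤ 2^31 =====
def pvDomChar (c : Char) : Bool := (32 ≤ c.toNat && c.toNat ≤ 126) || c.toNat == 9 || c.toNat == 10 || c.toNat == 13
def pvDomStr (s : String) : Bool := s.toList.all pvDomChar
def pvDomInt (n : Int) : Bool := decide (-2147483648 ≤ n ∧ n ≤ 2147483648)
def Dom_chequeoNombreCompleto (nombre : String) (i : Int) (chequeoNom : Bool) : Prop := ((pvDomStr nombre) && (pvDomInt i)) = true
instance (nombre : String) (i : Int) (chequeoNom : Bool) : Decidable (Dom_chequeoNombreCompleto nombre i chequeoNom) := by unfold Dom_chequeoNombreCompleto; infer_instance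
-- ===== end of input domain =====

-- B replaces A's index-carrying recursion by one flat loop over the deduped words (objective: simpler).

-- ===== PORT A =====
-- the recursive phase of A, after the i==0 call has turned nombre into list(set(nombre.split()))
def chequeoAuxA (nombre : List String) (i : Nat) (chequeoNom : Bool) : Bool :=
  -- Python tests 'len(nombre) == i'; '≤' is the same test on every reachable call (i starts
  -- at 0, grows by 1, the length is fixed) and makes the recursion total
  if h : nombre.length ≤ i ∨ chequeoNom = false then chequeoNom
  else
    let w := PySem.Str.strip (nombre.getD i "")   -- nombre[i].strip()
    let nombre' := nombre.set i w                 -- nombre[i] = …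
    let chequeoNom' :=
      if ¬(PySem.Str.strIsalpha w = true ∧ 3 ≤ PySem.Str.len w)
          ∨ nombre.length < 2 ∨ 5 < nombre.length then false else chequeoNom
    chequeoAuxA nombre' (i + 1) chequeoNom'
  termination_by nombre.length - i
  decreasing_by simp only [List.length_set]; omega

def chequeoNombreCompleto (nombre : String) (i : Int) (chequeoNom : Bool) : Bool :=
  if i = 0 then
    chequeoAuxA (PySem.Set.ofList (PySem.Str.split₀ nombre)) 0 chequeoNom
  else
    -- re-entry with the raw string: Python returns chequeoNom when len(nombre)==i or
    -- chequeoNom is False, and otherwise raises TypeError (string item assignment);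
    -- the raising inputs are outside Pre_, the port returns false there
    if (PySem.Str.len nombre : Int) = i ∨ chequeoNom = false then chequeoNom else false

-- ===== PORT B =====
def chequeoNombreCompleto_alt (nombre : String) (i : Int) (chequeoNom : Bool) : Bool :=
  if chequeoNom = false then false
  else
    let words := PySem.Set.ofList (PySem.Str.split₀ nombre)   -- list(set(str(nombre).split()))
    if words = [] then true
    else
      let ok0 := decide (2 ≤ words.length ∧ words.length ≤ 5)
      words.foldl (fun ok w =>
        let ws := PySem.Str.strip w
        if ¬(PySem.Str.strIsalpha ws = true ∧ 3 ≤ PySem.Str.len ws) then false else ok) ok0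

-- ===== PRECONDITION & SPEC =====
-- Pre_ keeps calls with i = 0 (the function's interface) or chequeoNom = False (A returns it
-- unconditionally). A nonzero i re-enters A's internal recursion on the raw string, where A
-- raises TypeError on the string item assignment except in the accidental corner
-- i == len(nombre), whose returned accumulator True does not validate nombre at all.
def Pre_chequeoNombreCompleto (nombre : String) (i : Int) (chequeoNom : Bool) : Prop :=
  i = 0 ∨ chequeoNom = false
instance (nombre : String) (i : Int) (chequeoNom : Bool) : Decidable (Pre_chequeoNombreCompleto nombre i chequeoNom) := by unfold Pre_chequeoNombreCompleto; infer_instance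
def pvWitness_chequeoNombreCompleto : String × Int × Bool := ("Ana Sol", 0, true)


def Spec_chequeoNombreCompleto (nombre : String) (i : Int) (chequeoNom : Bool) (out : Bool) : Prop := out = chequeoNombreCompleto_alt nombre i chequeoNom
instance (nombre : String) (i : Int) (chequeoNom : Bool) (out : Bool) : Decidable (Spec_chequeoNombreCompleto nombre i chequeoNom out) := by unfold Spec_chequeoNombreCompleto; infer_instance

-- ===== CLAIM (what is proved, stated in full; the proofs are below) =====
def Claim_equal_chequeoNombreCompleto : Prop := ∀ (nombre : String) (i : Int) (chequeoNom : Bool), Dom_chequeoNombreCompleto nombre i chequeoNom → Pre_chequeoNombreCompleto nombre i chequeoNom → Spec_chequeoNombreCompleto nombre i chequeoNom (chequeoNombreCompleto nombre i chequeoNom)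

-- ===== LEMMAS AND PROOFS =====
-- the per-word check both programs make: alphabetic with at least 3 letters, after strip
def pvValidWord (w : String) : Bool :=
  decide (PySem.Str.strIsalpha (PySem.Str.strip w) = true ∧ 3 ≤ PySem.Str.len (PySem.Str.strip w))

lemma chequeoAuxA_false (l : List String) (i : Nat) : chequeoAuxA l i false = false := by
  unfold chequeoAuxA
  simp

lemma chequeoAuxA_true (n : Nat) (l : List String) (i : Nat)
    (hn : l.length - i = n) (hi : i ≤ l.length) :
    chequeoAuxA l i true =
      ((decide (2 ≤ l.length ∧ l.length ≤ 5) || decide (l.length = i))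
        && (l.drop i).all pvValidWord) := by
  induction n generalizing l i with
  | zero =>
    have hlen : l.length = i := by omega
    unfold chequeoAuxA
    rw [← hlen, List.drop_length]
    simp
  | succ m ih =>
    have hlt : i < l.length := by omega
    have hc : ¬(l.length ≤ i ∨ (true = false)) := by
      simp
      omega
    unfold chequeoAuxA
    rw [dif_neg hc]
    show chequeoAuxA (l.set i (PySem.Str.strip (l.getD i "")))
        (i + 1)
        (if ¬(PySem.Str.strIsalpha (PySem.Str.strip (l.getD i "")) = true ∧
              3 ≤ PySem.Str.len (PySem.Str.strip (l.getD i ""))) ∨ l.length < 2 ∨ 5 < l.length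
         then false else true) = _
    have hget : l.getD i "" = l[i] := List.getD_eq_getElem l "" hlt
    have hdrop : l.drop i = l[i] :: l.drop (i + 1) := List.drop_eq_getElem_cons hlt
    have hvalid : pvValidWord l[i] =
        decide (PySem.Str.strIsalpha (PySem.Str.strip (l.getD i "")) = true ∧
          3 ≤ PySem.Str.len (PySem.Str.strip (l.getD i ""))) := by
      rw [hget]; rfl
    by_cases hb : PySem.Str.strIsalpha (PySem.Str.strip (l.getD i "")) = true ∧
        3 ≤ PySem.Str.len (PySem.Str.strip (l.getD i ""))
    · by_cases hlen2 : 2 ≤ l.length ∧ l.length ≤ 5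
      · -- word valid, length in range: recurse with True
        have hcond : ¬(¬(PySem.Str.strIsalpha (PySem.Str.strip (l.getD i "")) = true ∧
            3 ≤ PySem.Str.len (PySem.Str.strip (l.getD i ""))) ∨ l.length < 2 ∨ 5 < l.length) := by
          rintro (h | h)
          · exact h hb
          · omega
        rw [if_neg hcond]
        rw [ih (l.set i (PySem.Str.strip (l.getD i ""))) (i + 1)
          (by simp [List.length_set]; omega) (by simp [List.length_set]; omega)]
        have hds : (l.set i (PySem.Str.strip (l.getD i ""))).drop (i + 1) = l.drop (i + 1) := by
          simp [List.drop_set]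
        rw [hds, hdrop, List.all_cons, hvalid, decide_eq_true hb, Bool.true_and]
        simp only [List.length_set]
        rw [decide_eq_true hlen2]
        simp
      · -- length out of range: flag goes False, result False
        rw [if_pos (Or.inr (by omega)), chequeoAuxA_false]
        have hne : ¬ l.length = i := by omega
        rw [decide_eq_false hlen2, decide_eq_false hne, Bool.false_or, Bool.false_and]
    · -- word invalid: flag goes False, result False
      rw [if_pos (Or.inl hb), chequeoAuxA_false]
      rw [hdrop, List.all_cons, hvalid, decide_eq_false hb, Bool.false_and, Bool.and_false]

lemma foldl_and_valid (l : List String) (a : Bool) :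
    l.foldl (fun ok w =>
      let ws := PySem.Str.strip w
      if ¬(PySem.Str.strIsalpha ws = true ∧ 3 ≤ PySem.Str.len ws) then false else ok) a
    = (a && l.all pvValidWord) := by
  induction l generalizing a with
  | nil => simp
  | cons x xs ih =>
    show List.foldl _
        (if ¬(PySem.Str.strIsalpha (PySem.Str.strip x) = true ∧
              3 ≤ PySem.Str.len (PySem.Str.strip x)) then false else a) xs = _
    by_cases h : PySem.Str.strIsalpha (PySem.Str.strip x) = true ∧
        3 ≤ PySem.Str.len (PySem.Str.strip x)
    · have hv : pvValidWord x = true := decide_eq_true h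
      rw [if_neg (not_not_intro h), ih, List.all_cons, hv, Bool.true_and]
    · have hv : pvValidWord x = false := decide_eq_false h
      rw [if_pos h, ih, List.all_cons, hv, Bool.false_and, Bool.and_false]

-- ===== VERDICT (by name: the statement is the Claim_ definition above) =====
theorem chequeoNombreCompleto_spec : Claim_equal_chequeoNombreCompleto := by
  intro nombre i c _ hp
  unfold Spec_chequeoNombreCompleto chequeoNombreCompleto chequeoNombreCompleto_alt
  cases c with
  | false =>
    by_cases h0 : i = 0
    · simp [h0, chequeoAuxA_false]
    · simp [h0]
  | true =>
    have h0 : i = 0 := by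
      rcases hp with h | h
      · exact h
      · exact absurd h (by decide)
    subst h0
    rw [if_pos rfl, if_neg (by decide)]
    rw [chequeoAuxA_true (PySem.Set.ofList (PySem.Str.split₀ nombre)).length _ 0 (by omega) (by omega)]
    by_cases hnil : PySem.Set.ofList (PySem.Str.split₀ nombre) = []
    · simp [hnil]
    · rw [if_neg hnil]
      show _ = List.foldl _
        (decide (2 ≤ (PySem.Set.ofList (PySem.Str.split₀ nombre)).length ∧
          (PySem.Set.ofList (PySem.Str.split₀ nombre)).length ≤ 5))
        (PySem.Set.ofList (PySem.Str.split₀ nombre))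
      rw [foldl_and_valid]
      have hlen : (PySem.Set.ofList (PySem.Str.split₀ nombre)).length ≠ 0 := by
        simpa using hnil
      simp [hlen]
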